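-- pv_equiv track=rewrite | github.com/uvamsi76/DSA | A-Z/dec/submit.py | maxcows
-- ===== SOURCE A (Python) =====
-- def ispossible(arr,c,mid):
--     cnt=0
--     last=arr[0]
--     for i in range(1,len(arr)):
--         if(arr[i]-last>=mid):
--             cnt+=1
--             last=arr[i]
--     return cnt>=c
--
-- def maxcows(arr,c):
--     arr.sort()
--     low=1
--     high=max(arr)-min(arr)
--     while(low<=high):
--         mid=(low+high)//2
--         st=ispossible(arr,c,mid)
--         if(st):
--             low=mid+1
--         else:
--             high=mid-1
--     return high
-- ===== SOURCE B (Python) =====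
-- def maxcows(arr, c):
--     arr.sort()
--     gaps = set()
--     for k in range(len(arr)):
--         for y in arr[k + 1:]:
--             d = y - arr[k]
--             if d >= 1:
--                 gaps.add(d)
--     for g in sorted(gaps, reverse=True):
--         cnt = 0
--         last = arr[0]
--         for x in arr[1:]:
--             if x - last >= g:
--                 cnt += 1
--                 last = x
--         if cnt >= c:
--             return g
--     return 0
-- ===== Notes on version B (the rewrite author's own statement) =====
-- stated objective: alternative
-- what changed: Replaces binary search on the answer value by collecting the distinct pairwise gaps of the sorted array into a set and scanning them in descending order for the first feasible gap (the greedy feasibility check is kept).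
import Mathlib
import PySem

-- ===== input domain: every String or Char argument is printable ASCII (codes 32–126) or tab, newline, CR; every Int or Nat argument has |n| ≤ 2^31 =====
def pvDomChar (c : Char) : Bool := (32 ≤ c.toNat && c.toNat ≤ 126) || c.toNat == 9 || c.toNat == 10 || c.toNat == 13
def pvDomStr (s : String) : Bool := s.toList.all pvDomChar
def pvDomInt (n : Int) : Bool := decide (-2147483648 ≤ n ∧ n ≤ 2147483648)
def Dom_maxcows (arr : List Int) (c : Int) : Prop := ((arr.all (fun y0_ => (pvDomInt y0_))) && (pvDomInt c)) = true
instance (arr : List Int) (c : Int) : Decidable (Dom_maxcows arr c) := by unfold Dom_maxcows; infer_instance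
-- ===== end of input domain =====

-- B replaces A's binary search on the answer by a descending scan of the distinct pairwise
-- gaps of the sorted array (alternative algorithm, not faster). Both A and B sort `arr`
-- in place (arr.sort()); the equivalence proved here is about the return value.

-- ===== PORT A =====
def ispossible (arr : List Int) (c mid : Int) : Bool :=
  -- cnt=0; last=arr[0]; for i in range(1,len(arr)): if arr[i]-last>=mid: cnt+=1; last=arr[i]
  let st := (PySem.List.pyRange 1 (PySem.List.len arr) 1).foldl
    (fun (s : Int × Int) i =>
      if PySem.List.pyGetD arr i 0 - s.2 ≥ mid then (s.1 + 1, PySem.List.pyGetD arr i 0) else s)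
    (0, PySem.List.pyGetD arr 0 0)
  decide (st.1 ≥ c)

def maxcowsLoop (arr : List Int) (c low high : Int) : Int :=
  -- while(low<=high): mid=(low+high)//2; if ispossible: low=mid+1 else high=mid-1; return high
  if h : low ≤ high then
    let mid := PySem.Int.floordiv (low + high) 2
    if ispossible arr c mid then maxcowsLoop arr c (mid + 1) high
    else maxcowsLoop arr c low (mid - 1)
  else high
termination_by (high + 1 - low).toNat
decreasing_by
  · have := PySem.Int.floordiv_two_mid_bounds h; omega
  · have := PySem.Int.floordiv_two_mid_bounds h; omega

def maxcows (arr : List Int) (c : Int) : Int :=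
  let sa := PySem.List.sorted arr (fun x => x) false
  let high := (PySem.List.max? sa (fun x => x)).getD 0 - (PySem.List.min? sa (fun x => x)).getD 0
  maxcowsLoop sa c 1 high

-- ===== PORT B =====
-- gaps = set(); for k in range(len(arr)): for y in arr[k+1:]: d = y-arr[k]; if d>=1: gaps.add(d)
def gapsB (arr : List Int) : PySem.Set Int :=
  (PySem.List.pyRange 0 (PySem.List.len arr) 1).foldl
    (fun s k =>
      (PySem.List.slice arr (some (k + 1)) none).foldl
        (fun s2 y =>
          let d := y - PySem.List.pyGetD arr k 0
          if d ≥ 1 then PySem.Set.add s2 d else s2) s)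
    PySem.Set.empty

-- cnt=0; last=arr[0]; for x in arr[1:]: if x-last>=g: cnt+=1; last=x; return cnt>=c
def feasibleB (arr : List Int) (c g : Int) : Bool :=
  let st := (PySem.List.slice arr (some 1) none).foldl
    (fun (s : Int × Int) x => if x - s.2 ≥ g then (s.1 + 1, x) else s)
    (0, PySem.List.pyGetD arr 0 0)
  decide (st.1 ≥ c)

-- for g in sorted(gaps, reverse=True): if feasible: return g; return 0
def scanB (arr : List Int) (c : Int) : List Int → Int
  | [] => 0
  | g :: rest => if feasibleB arr c g then g else scanB arr c rest

def maxcows_alt (arr : List Int) (c : Int) : Int :=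
  let sa := PySem.List.sorted arr (fun x => x) false
  scanB sa c (PySem.List.sorted (gapsB sa) (fun x => x) true)

-- ===== PRECONDITION & SPEC =====
-- Pre_ excludes only the empty list, on which A raises ValueError (max() of an empty sequence).
def Pre_maxcows (arr : List Int) (c : Int) : Prop := arr ≠ []
instance (arr : List Int) (c : Int) : Decidable (Pre_maxcows arr c) := by unfold Pre_maxcows; infer_instance
def pvWitness_maxcows : List Int × Int := ([1, 4, 9], 2)

def Spec_maxcows (arr : List Int) (c : Int) (out : Int) : Prop := out = maxcows_alt arr c
instance (arr : List Int) (c : Int) (out : Int) : Decidable (Spec_maxcows arr c out) := by unfold Spec_maxcows; infer_instance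

-- ===== CLAIM (what is proved, stated in full; the proofs are below) =====
def Claim_equal_maxcows : Prop := ∀ (arr : List Int) (c : Int), Dom_maxcows arr c → Pre_maxcows arr c → Spec_maxcows arr c (maxcows arr c)

-- ===== LEMMAS AND PROOFS =====

-- selChain d last t : the elements the greedy pass keeps (gap ≥ d), starting from last
def selChain (d last : Int) : List Int → List Int
  | [] => []
  | x :: t => if x - last ≥ d then x :: selChain d x t else selChain d last t

def lastSel (d last : Int) : List Int → Int
  | [] => last
  | x :: t => if x - last ≥ d then lastSel d x t else lastSel d last t

def chainOK (d last : Int) : List Int → Prop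
  | [] => True
  | y :: s => y - last ≥ d ∧ chainOK d y s

def chainGaps (last : Int) : List Int → List Int
  | [] => []
  | y :: s => (y - last) :: chainGaps y s

def pairDiffs : List Int → List Int
  | [] => []
  | x :: t => (t.filter (fun y => decide (1 ≤ y - x))).map (fun y => y - x) ++ pairDiffs t

def innerGaps (arr : List Int) (k : Int) (s : PySem.Set Int) : PySem.Set Int :=
  (PySem.List.slice arr (some (k + 1)) none).foldl
    (fun s2 y =>
      let d := y - PySem.List.pyGetD arr k 0
      if d ≥ 1 then PySem.Set.add s2 d else s2) s

theorem foldl_sel (d : Int) : ∀ (t : List Int) (cnt0 last : Int),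
    t.foldl (fun (s : Int × Int) v => if v - s.2 ≥ d then (s.1 + 1, v) else s) (cnt0, last)
      = (cnt0 + ((selChain d last t).length : Int), lastSel d last t)
  | [], cnt0, last => by simp [selChain, lastSel]
  | x :: t, cnt0, last => by
    simp only [List.foldl_cons, selChain, lastSel]
    split_ifs with hx
    · rw [foldl_sel d t (cnt0 + 1) x]
      refine Prod.ext ?_ rfl
      simp [List.length_cons]
      push_cast
      ring
    · rw [foldl_sel d t cnt0 last]

theorem ispossible_eq (x : Int) (t : List Int) (c mid : Int) :
    ispossible (x :: t) c mid = decide (c ≤ ((selChain mid x t).length : Int)) := by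
  unfold ispossible
  rw [PySem.List.foldl_pyRange_pyGetD (x :: t) 0
    (fun (s : Int × Int) v => if v - s.2 ≥ mid then (s.1 + 1, v) else s)
    (0, PySem.List.pyGetD (x :: t) 0 0) (by norm_num : (0:Int) ≤ 1)]
  simp only [PySem.List.pyGetD_zero_cons, Int.toNat_one, List.drop_succ_cons, List.drop_zero]
  rw [foldl_sel]
  simp only [ge_iff_le]
  exact decide_eq_decide.mpr (by omega)

theorem feasibleB_eq (x : Int) (t : List Int) (c g : Int) :
    feasibleB (x :: t) c g = decide (c ≤ ((selChain g x t).length : Int)) := by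
  unfold feasibleB
  rw [PySem.List.slice_from_one]
  simp only [PySem.List.pyGetD_zero_cons, List.tail_cons]
  rw [foldl_sel]
  simp only [ge_iff_le]
  exact decide_eq_decide.mpr (by omega)

theorem sel_sublist (d : Int) : ∀ (t : List Int) (last : Int), (selChain d last t).Sublist t
  | [], _ => List.Sublist.refl _
  | x :: t, last => by
    rw [selChain]
    split_ifs with hx
    · exact List.cons_sublist_cons.mpr (sel_sublist d t x)
    · exact List.sublist_cons_of_sublist x (sel_sublist d t last)

theorem sel_chainOK (d : Int) : ∀ (t : List Int) (last : Int), chainOK d last (selChain d last t)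
  | [], _ => trivial
  | x :: t, last => by
    rw [selChain]
    split_ifs with hx
    · exact ⟨hx, sel_chainOK d t x⟩
    · exact sel_chainOK d t last

theorem chainOK_mono (d d' : Int) (hdd : d ≤ d') : ∀ (s : List Int) (last : Int),
    chainOK d' last s → chainOK d last s
  | [], _, _ => trivial
  | y :: s, last, h => ⟨by have := h.1; omega, chainOK_mono d d' hdd s y h.2⟩

-- greedy stays ahead: the greedy selection is at least as long as any admissible chain
theorem exchange (d : Int) : ∀ (l sub : List Int) (last last' : Int),
    sub.Sublist l → l.Pairwise (fun a b : Int => a ≤ b) → last ≤ last' → chainOK d last' sub →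
    sub.length ≤ (selChain d last l).length
  | [], sub, last, last', hs, _, _, _ => by
    simp [List.sublist_nil.mp hs, selChain]
  | x :: l', sub, last, last', hs, hp, hll, hck => by
    obtain ⟨hxall, hp'⟩ := List.pairwise_cons.mp hp
    rw [selChain]
    rcases List.sublist_cons_iff.mp hs with hsub | ⟨r, rfl, hr⟩
    · split_ifs with hx
      · cases sub with
        | nil => simp
        | cons y sub' =>
          obtain ⟨hy, hck'⟩ := hck
          have hy_mem : y ∈ l' := hsub.subset (List.mem_cons_self ..)
          have hrec : sub'.length ≤ (selChain d x l').length :=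
            exchange d l' sub' x y (List.sublist_of_cons_sublist hsub) hp' (hxall y hy_mem) hck'
          simp only [List.length_cons]
          omega
      · exact exchange d l' sub last last' hsub hp' hll hck
    · obtain ⟨hx', hck'⟩ := hck
      split_ifs with hx
      · have hrec := exchange d l' r x x hr hp' le_rfl hck'
        simp only [List.length_cons]
        omega
      · exact absurd (show x - last ≥ d by omega) hx

theorem cnt_mono (d d' : Int) (hdd : d ≤ d') (l : List Int) (last : Int)
    (hp : l.Pairwise (fun a b : Int => a ≤ b)) :
    (selChain d' last l).length ≤ (selChain d last l).length :=
  exchange d l (selChain d' last l) last last (sel_sublist d' l last) hp le_rfl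
    (chainOK_mono d d' hdd _ last (sel_chainOK d' l last))

theorem chainGaps_ge (d : Int) : ∀ (s : List Int) (last : Int), chainOK d last s →
    ∀ g ∈ chainGaps last s, d ≤ g
  | [], _, _ => by simp [chainGaps]
  | y :: s, last, h => by
    intro g hg
    rw [chainGaps] at hg
    rcases List.mem_cons.mp hg with rfl | hg'
    · have := h.1; omega
    · exact chainGaps_ge d s y h.2 g hg'

theorem chainOK_of_ge : ∀ (s : List Int) (last e : Int),
    (∀ g ∈ chainGaps last s, e ≤ g) → chainOK e last s
  | [], _, _, _ => trivial
  | y :: s, last, e, h =>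
    ⟨by have := h (y - last) (by rw [chainGaps]; exact List.mem_cons_self ..); omega,
      chainOK_of_ge s y e (fun g hg => h g (by rw [chainGaps]; exact List.mem_cons_of_mem _ hg))⟩

theorem chainGaps_shape : ∀ (s : List Int) (last g : Int), g ∈ chainGaps last s →
    ∃ a b : Int, List.Sublist [a, b] (last :: s) ∧ g = b - a
  | [], _, _, h => absurd h (by simp [chainGaps])
  | y :: s, last, g, h => by
    rw [chainGaps] at h
    rcases List.mem_cons.mp h with rfl | h'
    · exact ⟨last, y,
        List.cons_sublist_cons.mpr (List.singleton_sublist.mpr (List.mem_cons_self ..)), rfl⟩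
    · obtain ⟨a, b, hs, rfl⟩ := chainGaps_shape s y g h'
      exact ⟨a, b, List.sublist_cons_of_sublist last hs, rfl⟩

theorem mem_pairDiffs_cons (x e : Int) (t : List Int) :
    e ∈ pairDiffs (x :: t) ↔ (∃ y ∈ t, 1 ≤ y - x ∧ e = y - x) ∨ e ∈ pairDiffs t := by
  rw [pairDiffs]
  simp only [List.mem_append, List.mem_map, List.mem_filter, decide_eq_true_eq]
  constructor
  · rintro (⟨y, ⟨hy, h1⟩, rfl⟩ | h)
    · exact Or.inl ⟨y, hy, h1, rfl⟩
    · exact Or.inr h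
  · rintro (⟨y, hy, h1, rfl⟩ | h)
    · exact Or.inl ⟨y, ⟨hy, h1⟩, rfl⟩
    · exact Or.inr h

theorem mem_pairDiffs_iff : ∀ (l : List Int) (e : Int),
    e ∈ pairDiffs l ↔ ∃ a b : Int, List.Sublist [a, b] l ∧ e = b - a ∧ 1 ≤ e
  | [], e => by
    rw [pairDiffs]
    simp only [List.not_mem_nil, false_iff, not_exists]
    rintro a b ⟨h, -⟩
    exact absurd (List.sublist_nil.mp h) (by simp)
  | x :: t, e => by
    rw [mem_pairDiffs_cons]
    constructor
    · rintro (⟨y, hy, h1, rfl⟩ | hrec)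
      · exact ⟨x, y, List.cons_sublist_cons.mpr (List.singleton_sublist.mpr hy), rfl, h1⟩
      · obtain ⟨a, b, hs, rfl, h1⟩ := (mem_pairDiffs_iff t e).mp hrec
        exact ⟨a, b, List.sublist_cons_of_sublist x hs, rfl, h1⟩
    · rintro ⟨a, b, hs, rfl, h1⟩
      rcases List.sublist_cons_iff.mp hs with hs' | ⟨r, hr, hrs⟩
      · exact Or.inr ((mem_pairDiffs_iff t _).mpr ⟨a, b, hs', rfl, h1⟩)
      · injection hr with h2 h3
        subst h2
        subst h3
        exact Or.inl ⟨b, List.singleton_sublist.mp hrs, h1, rfl⟩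

-- if the greedy chain at r is nonempty, its minimal gap e is a pairwise difference,
-- is ≥ r, and is still feasible for the same count
theorem exists_gap (x : Int) (t : List Int) (hp : (x :: t).Pairwise (fun a b : Int => a ≤ b))
    (c r : Int) (hr : 1 ≤ r) (hc : 1 ≤ c) (hP : c ≤ ((selChain r x t).length : Int)) :
    ∃ e, e ∈ pairDiffs (x :: t) ∧ r ≤ e ∧ c ≤ ((selChain e x t).length : Int) := by
  have hne : selChain r x t ≠ [] := by
    intro h
    rw [h] at hP
    simp at hP
    omega
  have hgne : chainGaps x (selChain r x t) ≠ [] := by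
    cases h : selChain r x t with
    | nil => exact absurd h hne
    | cons y s => rw [chainGaps]; simp
  obtain ⟨e, hm⟩ : ∃ e, PySem.List.min? (chainGaps x (selChain r x t)) (fun y => y) = some e := by
    cases hm : PySem.List.min? (chainGaps x (selChain r x t)) (fun y => y) with
    | none => exact absurd ((PySem.List.min?_eq_none_iff _ _).mp hm) hgne
    | some e => exact ⟨e, rfl⟩
  have he_mem : e ∈ chainGaps x (selChain r x t) := PySem.List.min?_mem hm
  have hge : ∀ g ∈ chainGaps x (selChain r x t), e ≤ g := PySem.List.min?_isMin hm
  have h_er : r ≤ e := chainGaps_ge r (selChain r x t) x (sel_chainOK r t x) e he_mem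
  have hok : chainOK e x (selChain r x t) := chainOK_of_ge (selChain r x t) x e hge
  have hlen : (selChain r x t).length ≤ (selChain e x t).length :=
    exchange e t (selChain r x t) x x (sel_sublist r t x) hp.of_cons le_rfl hok
  obtain ⟨a, b, hs, he⟩ := chainGaps_shape (selChain r x t) x e he_mem
  have hsub : List.Sublist [a, b] (x :: t) :=
    hs.trans (List.cons_sublist_cons.mpr (sel_sublist r t x))
  refine ⟨e, (mem_pairDiffs_iff _ _).mpr ⟨a, b, hsub, he, by omega⟩, h_er, by omega⟩

theorem mem_inner_fold (x : Int) (t : List Int) : ∀ (s : PySem.Set Int) (e : Int),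
    e ∈ t.foldl (fun s2 y => if y - x ≥ 1 then PySem.Set.add s2 (y - x) else s2) s ↔
      e ∈ s ∨ ∃ y ∈ t, 1 ≤ y - x ∧ e = y - x := by
  induction t with
  | nil => intro s e; simp
  | cons y t ih =>
    intro s e
    simp only [List.foldl_cons]
    rw [ih]
    by_cases hy : y - x ≥ 1
    · simp only [hy, if_pos, PySem.Set.mem_add, List.mem_cons]
      constructor
      · rintro ((h | rfl) | h)
        · exact Or.inl h
        · exact Or.inr ⟨y, Or.inl rfl, by omega, rfl⟩
        · obtain ⟨z, hz, h1, rfl⟩ := h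
          exact Or.inr ⟨z, Or.inr hz, h1, rfl⟩
      · rintro (h | ⟨z, hz, h1, rfl⟩)
        · exact Or.inl (Or.inl h)
        · rcases hz with rfl | hz'
          · exact Or.inl (Or.inr rfl)
          · exact Or.inr ⟨z, hz', h1, rfl⟩
    · simp only [hy, if_neg, List.mem_cons]
      constructor
      · rintro (h | ⟨z, hz, h1, rfl⟩)
        · exact Or.inl h
        · exact Or.inr ⟨z, Or.inr hz, h1, rfl⟩
      · rintro (h | ⟨z, hz, h1, rfl⟩)
        · exact Or.inl h
        · rcases hz with rfl | hz'
          · exact absurd (show z - x ≥ 1 by omega) hy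
          · exact Or.inr ⟨z, hz', h1, rfl⟩

theorem gapsB_eq_fold (arr : List Int) :
    gapsB arr = (PySem.List.pyRange 0 (PySem.List.len arr) 1).foldl
      (fun s k => innerGaps arr k s) PySem.Set.empty := rfl

theorem innerGaps_zero (x : Int) (t : List Int) (s : PySem.Set Int) :
    innerGaps (x :: t) 0 s
      = t.foldl (fun s2 y => if y - x ≥ 1 then PySem.Set.add s2 (y - x) else s2) s := by
  unfold innerGaps
  rw [show (0 : Int) + 1 = 1 from rfl, PySem.List.slice_from_one]
  simp only [PySem.List.pyGetD_zero_cons, List.tail_cons]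

theorem innerGaps_shift (x : Int) (t : List Int) (k : Nat) (s : PySem.Set Int) :
    innerGaps (x :: t) ((k : Int) + 1) s = innerGaps t (k : Int) s := by
  unfold innerGaps
  rw [show ((k : Int) + 1) + 1 = ((k + 2 : Nat) : Int) by push_cast; ring,
    show (k : Int) + 1 = ((k + 1 : Nat) : Int) by push_cast; ring,
    PySem.List.slice_from_natCast, PySem.List.slice_from_natCast]
  simp only [PySem.List.pyGetD_natCast, List.getD_cons_succ, List.drop_succ_cons]

theorem fold_inner_shift (x : Int) (t : List Int) : ∀ (n : Nat) (s : PySem.Set Int),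
    (PySem.List.pyRange 1 ((n : Int) + 1)).foldl (fun s k => innerGaps (x :: t) k s) s
      = (PySem.List.pyRange 0 (n : Int)).foldl (fun s k => innerGaps t k s) s := by
  intro n
  induction n with
  | zero =>
    intro s
    rw [show ((0 : Nat) : Int) + 1 = 1 by norm_num,
      PySem.List.pyRange_one_eq_nil le_rfl,
      PySem.List.pyRange_one_eq_nil (by norm_num : ((0 : Nat) : Int) ≤ 0)]
    rfl
  | succ n ihn =>
    intro s
    rw [show ((n + 1 : Nat) : Int) + 1 = ((n : Int) + 1) + 1 by push_cast; ring,
      PySem.List.pyRange_one_succ_right (by omega : (1 : Int) ≤ (n : Int) + 1),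
      show ((n + 1 : Nat) : Int) = (n : Int) + 1 by push_cast; ring,
      PySem.List.pyRange_one_succ_right (by omega : (0 : Int) ≤ (n : Int)),
      List.foldl_append, List.foldl_append]
    simp only [List.foldl_cons, List.foldl_nil]
    rw [ihn s, innerGaps_shift]

theorem mem_gapsB_gen (arr : List Int) : ∀ (s : PySem.Set Int) (e : Int),
    (e ∈ (PySem.List.pyRange 0 (PySem.List.len arr) 1).foldl (fun s k => innerGaps arr k s) s) ↔
      e ∈ s ∨ e ∈ pairDiffs arr := by
  induction arr with
  | nil =>
    intro s e
    rw [show PySem.List.len ([] : List Int) = 0 by simp [PySem.List.len_eq],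
      PySem.List.pyRange_one_eq_nil le_rfl]
    simp [pairDiffs]
  | cons x t ih =>
    intro s e
    have hlen : PySem.List.len (x :: t) = (t.length : Int) + 1 := by
      rw [PySem.List.len_eq]
      push_cast [List.length_cons]
      ring
    rw [hlen, PySem.List.pyRange_one_cons (by omega : (0 : Int) < (t.length : Int) + 1)]
    simp only [List.foldl_cons]
    rw [show (0 : Int) + 1 = 1 from rfl, innerGaps_zero, fold_inner_shift x t t.length]
    have ih2 := ih (t.foldl (fun s2 y => if y - x ≥ 1 then PySem.Set.add s2 (y - x) else s2) s) e
    rw [PySem.List.len_eq] at ih2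
    rw [ih2, mem_inner_fold, mem_pairDiffs_cons]
    exact or_assoc

theorem mem_gapsB (arr : List Int) (e : Int) : e ∈ gapsB arr ↔ e ∈ pairDiffs arr := by
  rw [gapsB_eq_fold, mem_gapsB_gen]
  simp [PySem.Set.empty]

theorem pairDiffs_le (x M : Int) (t : List Int) (hM : ∀ y ∈ x :: t, y ≤ M)
    (hp : (x :: t).Pairwise (fun a b : Int => a ≤ b)) (e : Int) (he : e ∈ pairDiffs (x :: t)) :
    1 ≤ e ∧ e ≤ M - x := by
  obtain ⟨a, b, hs, rfl, h1⟩ := (mem_pairDiffs_iff _ _).mp he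
  have hsub := hs.subset
  have ha : a ∈ x :: t := hsub (List.mem_cons_self ..)
  have hb : b ∈ x :: t := hsub (List.mem_cons_of_mem _ (List.mem_cons_self ..))
  have hxa : x ≤ a := by
    rcases List.mem_cons.mp ha with rfl | h'
    · exact le_rfl
    · exact (List.pairwise_cons.mp hp).1 a h'
  have hbM : b ≤ M := hM b hb
  exact ⟨h1, by omega⟩

theorem min_getD_sorted (x : Int) (t : List Int)
    (hp : (x :: t).Pairwise (fun a b : Int => a ≤ b)) :
    (PySem.List.min? (x :: t) (fun y => y)).getD 0 = x := by
  cases hm : PySem.List.min? (x :: t) (fun y => y) with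
  | none => exact absurd ((PySem.List.min?_eq_none_iff _ _).mp hm) (by simp)
  | some m =>
    have hmem := PySem.List.min?_mem hm
    have hmin := PySem.List.min?_isMin hm
    have h1 : m ≤ x := hmin x (List.mem_cons_self ..)
    have h2 : x ≤ m := by
      rcases List.mem_cons.mp hmem with rfl | hmem'
      · exact le_rfl
      · exact (List.pairwise_cons.mp hp).1 m hmem'
    simpa using le_antisymm h1 h2

theorem max_getD_spec (x : Int) (t : List Int) :
    (PySem.List.max? (x :: t) (fun y => y)).getD 0 ∈ (x :: t) ∧
      ∀ y ∈ x :: t, y ≤ (PySem.List.max? (x :: t) (fun y => y)).getD 0 := by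
  cases hm : PySem.List.max? (x :: t) (fun y => y) with
  | none => exact absurd ((PySem.List.max?_eq_none_iff _ _).mp hm) (by simp)
  | some M =>
    exact ⟨by simpa using PySem.List.max?_mem hm, by simpa using PySem.List.max?_isMax hm⟩

theorem scan_spec (arr : List Int) (c : Int) : ∀ (L : List Int),
    L.Pairwise (fun a b : Int => b ≤ a) →
    (scanB arr c L = 0 ∧ ∀ g ∈ L, feasibleB arr c g = false) ∨
    (scanB arr c L ∈ L ∧ feasibleB arr c (scanB arr c L) = true ∧
      ∀ g ∈ L, feasibleB arr c g = true → g ≤ scanB arr c L) := by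
  intro L
  induction L with
  | nil => exact fun _ => Or.inl ⟨rfl, by simp⟩
  | cons g rest ih =>
    intro hL
    obtain ⟨hg, hrest⟩ := List.pairwise_cons.mp hL
    by_cases hf : feasibleB arr c g = true
    · right
      simp only [scanB, hf, if_true]
      refine ⟨by simp, by simp [hf], ?_⟩
      intro g' hg' _
      rcases List.mem_cons.mp hg' with rfl | h'
      · exact le_rfl
      · exact hg g' h'
    · have hf' : feasibleB arr c g = false := by
        cases h : feasibleB arr c g
        · rfl
        · exact absurd h hf
      simp only [scanB, hf', Bool.false_eq_true, if_false]
      rcases ih hrest with ⟨hz, hall⟩ | ⟨hmem, hfe, hmax⟩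
      · refine Or.inl ⟨hz, ?_⟩
        intro g' hg'
        rcases List.mem_cons.mp hg' with rfl | h'
        · exact hf'
        · exact hall g' h'
      · right
        refine ⟨List.mem_cons_of_mem _ hmem, hfe, ?_⟩
        intro g' hg' hgf
        rcases List.mem_cons.mp hg' with rfl | h'
        · rw [hgf] at hf'
          cases hf'
        · exact hmax g' h' hgf

theorem loop_base (arr : List Int) (c Hv low high : Int) (hlh : ¬ low ≤ high)
    (h1 : 1 ≤ low) (h2 : low ≤ high + 1) (h3 : high ≤ Hv)
    (h4 : 2 ≤ low → ispossible arr c (low - 1) = true)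
    (h5 : ∀ m : Int, high < m → m ≤ Hv → ispossible arr c m = false) :
    0 ≤ maxcowsLoop arr c low high ∧ maxcowsLoop arr c low high ≤ Hv ∧
      (1 ≤ maxcowsLoop arr c low high → ispossible arr c (maxcowsLoop arr c low high) = true) ∧
      (∀ m : Int, maxcowsLoop arr c low high < m → m ≤ Hv → ispossible arr c m = false) := by
  rw [maxcowsLoop]
  simp only [dif_neg hlh]
  refine ⟨by omega, h3, ?_, h5⟩
  intro hh
  have hle : low - 1 = high := by omega
  have := h4 (by omega)
  rwa [hle] at this

theorem loop_spec (arr : List Int) (c Hv : Int)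
    (Pmono : ∀ a b : Int, a ≤ b → ispossible arr c b = true → ispossible arr c a = true) :
    ∀ (n : Nat) (low high : Int), (high + 1 - low).toNat ≤ n →
    1 ≤ low → low ≤ high + 1 → high ≤ Hv →
    (2 ≤ low → ispossible arr c (low - 1) = true) →
    (∀ m : Int, high < m → m ≤ Hv → ispossible arr c m = false) →
    0 ≤ maxcowsLoop arr c low high ∧ maxcowsLoop arr c low high ≤ Hv ∧
      (1 ≤ maxcowsLoop arr c low high → ispossible arr c (maxcowsLoop arr c low high) = true) ∧
      (∀ m : Int, maxcowsLoop arr c low high < m → m ≤ Hv → ispossible arr c m = false) := by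
  intro n
  induction n with
  | zero =>
    intro low high hn h1 h2 h3 h4 h5
    exact loop_base arr c Hv low high (by omega) h1 h2 h3 h4 h5
  | succ n ihn =>
    intro low high hn h1 h2 h3 h4 h5
    by_cases hlh : low ≤ high
    · have hmid := PySem.Int.floordiv_two_mid_bounds hlh
      rw [maxcowsLoop]
      simp only [dif_pos hlh]
      by_cases hp : ispossible arr c (PySem.Int.floordiv (low + high) 2) = true
      · simp only [hp, if_true]
        exact ihn (PySem.Int.floordiv (low + high) 2 + 1) high (by omega) (by omega) (by omega)
          h3 (fun _ => by simpa using hp) h5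
      · have hpf : ispossible arr c (PySem.Int.floordiv (low + high) 2) = false := by
          cases h : ispossible arr c (PySem.Int.floordiv (low + high) 2)
          · rfl
          · exact absurd h hp
        simp only [hpf, Bool.false_eq_true, if_false]
        refine ihn low (PySem.Int.floordiv (low + high) 2 - 1) (by omega) h1 (by omega)
          (by omega) h4 ?_
        intro m hm1 hm2
        by_cases hmh : m ≤ high
        · cases hb : ispossible arr c m
          · rfl
          · have := Pmono (PySem.Int.floordiv (low + high) 2) m (by omega) hb
            rw [this] at hpf
            cases hpf
        · exact h5 m (by omega) hm2
    · exact loop_base arr c Hv low high hlh h1 h2 h3 h4 h5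

-- ===== VERDICT (by name: the statement is the Claim_ definition above) =====
theorem maxcows_spec : Claim_equal_maxcows := by
  intro arr c _ hpre
  unfold Spec_maxcows
  obtain ⟨x, t, hsa⟩ : ∃ y ys, PySem.List.sorted arr (fun v => v) false = y :: ys := by
    cases h : PySem.List.sorted arr (fun v => v) false with
    | nil => exact absurd ((PySem.List.sorted_eq_nil_iff arr (fun v => v) false).mp h) hpre
    | cons a b => exact ⟨a, b, rfl⟩
  have hp : (x :: t).Pairwise (fun a b : Int => a ≤ b) := by
    rw [← hsa]
    exact PySem.List.sorted_pairwise arr (fun v => v)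
  simp only [maxcows, maxcows_alt]
  rw [hsa]
  rw [min_getD_sorted x t hp]
  obtain ⟨hMmem, hMmax⟩ := max_getD_spec x t
  set M := (PySem.List.max? (x :: t) (fun y => y)).getD 0 with hMdef
  have hxM : x ≤ M := hMmax x (List.mem_cons_self ..)
  have hPmono : ∀ a b : Int, a ≤ b → ispossible (x :: t) c b = true →
      ispossible (x :: t) c a = true := by
    intro a b hab hb
    rw [ispossible_eq] at hb ⊢
    simp only [decide_eq_true_eq] at hb ⊢
    have := cnt_mono a b hab t x hp.of_cons
    omega
  obtain ⟨hr0, hrH, hrP, hrMax⟩ := loop_spec (x :: t) c (M - x) hPmono (M - x).toNat 1 (M - x)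
    (by omega) le_rfl (by omega) le_rfl (fun h => absurd h (by norm_num))
    (fun m hm1 hm2 => absurd hm2 (not_le.mpr hm1))
  set r := maxcowsLoop (x :: t) c 1 (M - x) with hrdef
  have hLdesc : (PySem.List.sorted (gapsB (x :: t)) (fun y => y) true).Pairwise
      (fun a b : Int => b ≤ a) := PySem.List.sorted_pairwise_rev (gapsB (x :: t)) (fun y => y)
  have memL : ∀ g : Int, g ∈ PySem.List.sorted (gapsB (x :: t)) (fun y => y) true ↔
      g ∈ pairDiffs (x :: t) := by
    intro g
    rw [PySem.List.mem_sorted, mem_gapsB]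
  have hfeq : ∀ g : Int, feasibleB (x :: t) c g = ispossible (x :: t) c g := by
    intro g
    rw [feasibleB_eq, ispossible_eq]
  -- the case c ≤ 0 uses e := M - x as the witnessing pairwise difference
  have hMx_diff : 1 ≤ M - x → (M - x) ∈ pairDiffs (x :: t) := by
    intro h1
    have hMt : M ∈ t := by
      rcases List.mem_cons.mp hMmem with h' | h'
      · omega
      · exact h'
    exact (mem_pairDiffs_iff _ _).mpr
      ⟨x, M, List.cons_sublist_cons.mpr (List.singleton_sublist.mpr hMt), rfl, h1⟩
  rcases scan_spec (x :: t) c (PySem.List.sorted (gapsB (x :: t)) (fun y => y) true) hLdesc with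
    ⟨hz, hnone⟩ | ⟨hmem, hfe, hmax⟩
  · -- no gap is feasible: B returns 0, show A returns 0 too
    rw [hz]
    by_contra hne
    have hr1 : 1 ≤ r := by omega
    have hPr : c ≤ ((selChain r x t).length : Int) := by
      have := hrP hr1
      rw [ispossible_eq] at this
      simpa using this
    by_cases hc : 1 ≤ c
    · obtain ⟨e, heD, her, heP⟩ := exists_gap x t hp c r hr1 hc hPr
      have := hnone e ((memL e).mpr heD)
      rw [hfeq, ispossible_eq] at this
      simp only [decide_eq_false_iff_not] at this
      exact this heP
    · have h1 : 1 ≤ M - x := by omega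
      have := hnone (M - x) ((memL _).mpr (hMx_diff h1))
      rw [hfeq, ispossible_eq] at this
      simp only [decide_eq_false_iff_not] at this
      exact this (by omega)
  · -- B returns the largest feasible gap r'; show A's r equals it
    set r' := scanB (x :: t) c (PySem.List.sorted (gapsB (x :: t)) (fun y => y) true) with hr'def
    have hr'P : ispossible (x :: t) c r' = true := by
      rw [← hfeq]
      exact hfe
    obtain ⟨hr'1, hr'H⟩ := pairDiffs_le x M t hMmax hp r' ((memL r').mp hmem)
    have h1 : r' ≤ r := by
      by_contra h
      have := hrMax r' (by omega) hr'H
      rw [this] at hr'P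
      cases hr'P
    have hr1 : 1 ≤ r := by omega
    have hPr : c ≤ ((selChain r x t).length : Int) := by
      have := hrP hr1
      rw [ispossible_eq] at this
      simpa using this
    by_cases hc : 1 ≤ c
    · obtain ⟨e, heD, her, heP⟩ := exists_gap x t hp c r hr1 hc hPr
      have hef : feasibleB (x :: t) c e = true := by
        rw [hfeq, ispossible_eq]
        simpa using heP
      have := hmax e ((memL e).mpr heD) hef
      omega
    · have hMf : feasibleB (x :: t) c (M - x) = true := by
        rw [hfeq, ispossible_eq]
        simp only [decide_eq_true_eq]
        omega
      have := hmax (M - x) ((memL _).mpr (hMx_diff (by omega))) hMf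
      omega
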